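-- pv_equiv track=rewrite | github.com/TheNitromeFan/baekjoon | 04849.py | stops
-- ===== SOURCE A (Python) =====
-- def stops(suit_cards):
--     ret = 0
--     for cards in suit_cards.values():
--         if "A" in cards:
--             ret += 1
--         elif "K" in cards and len(cards) >= 2:
--             ret += 1
--         elif "Q" in cards and len(cards) >= 3:
--             ret += 1
--         elif "J" in cards and len(cards) >= 4:
--             ret += 1
--     return ret
-- ===== SOURCE B (Python) =====
-- def stops(suit_cards):
--     remaining = list(suit_cards.values())
--     total = 0
--     for rank, need in (("A", 1), ("K", 2), ("Q", 3), ("J", 4)):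
--         total += len([c for c in remaining if rank in c and len(c) >= need])
--         remaining = [c for c in remaining if not (rank in c and len(c) >= need)]
--     return total
-- ===== Notes on version B (the rewrite author's own statement) =====
-- stated objective: alternative
-- what changed: Replaces the single pass with a per-suit elif chain by a four-stage sieve: for each honor threshold in turn it counts the still-unstopped suits that this honor stops and filters them out of the working list, so no suit-level branch chain remains.
import Mathlib
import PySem

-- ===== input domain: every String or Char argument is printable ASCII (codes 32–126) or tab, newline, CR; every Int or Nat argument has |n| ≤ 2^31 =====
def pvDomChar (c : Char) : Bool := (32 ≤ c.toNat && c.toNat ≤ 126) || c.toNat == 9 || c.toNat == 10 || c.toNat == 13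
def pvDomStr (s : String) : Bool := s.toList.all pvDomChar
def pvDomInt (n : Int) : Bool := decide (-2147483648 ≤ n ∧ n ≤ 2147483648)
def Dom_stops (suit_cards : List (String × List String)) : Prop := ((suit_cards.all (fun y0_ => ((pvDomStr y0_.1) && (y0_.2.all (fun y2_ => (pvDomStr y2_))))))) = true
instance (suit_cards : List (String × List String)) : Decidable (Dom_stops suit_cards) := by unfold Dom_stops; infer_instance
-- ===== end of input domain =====

-- B replaces A's one-pass elif chain by a four-stage sieve over honor thresholds (count then filter out); alternative structure, same cost.

-- ===== PORT A =====
def stops (suit_cards : List (String × List String)) : Int :=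
  (PySem.Dict.ofList suit_cards).values.foldl (fun ret cards =>
    if "A" ∈ cards then ret + 1
    else if "K" ∈ cards ∧ (2 : Int) ≤ cards.length then ret + 1
    else if "Q" ∈ cards ∧ (3 : Int) ≤ cards.length then ret + 1
    else if "J" ∈ cards ∧ (4 : Int) ≤ cards.length then ret + 1
    else ret) 0

-- ===== PORT B =====
def stopTable : List (String × Int) := [("A", 1), ("K", 2), ("Q", 3), ("J", 4)]

def stopHit (p : String × Int) (c : List String) : Bool :=
  decide (p.1 ∈ c) && decide (p.2 ≤ (c.length : Int))

def stops_alt (suit_cards : List (String × List String)) : Int :=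
  let st := stopTable.foldl
    (fun (st : Int × List (List String)) p =>
      (st.1 + ((st.2.filter (fun c => stopHit p c)).length : Int),
       st.2.filter (fun c => !stopHit p c)))
    (0, (PySem.Dict.ofList suit_cards).values)
  st.1

-- ===== PRECONDITION & SPEC =====
def Spec_stops (suit_cards : List (String × List String)) (out : Int) : Prop := out = stops_alt suit_cards
instance (suit_cards : List (String × List String)) (out : Int) : Decidable (Spec_stops suit_cards out) := by unfold Spec_stops; infer_instance

-- ===== CLAIM (what is proved, stated in full; the proofs are below) =====
def Claim_equal_stops : Prop := ∀ (suit_cards : List (String × List String)), Dom_stops suit_cards → Spec_stops suit_cards (stops suit_cards)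

-- ===== LEMMAS AND PROOFS =====

-- one sieve stage: count of p-hits plus a count over the survivors is a combined count
lemma sieve_step {α : Type} (p q : α → Bool) (l : List α) :
    (l.countP p : Int) + ((l.filter (fun x => !p x)).countP q : Int)
      = (l.countP (fun x => p x || q x) : Int) := by
  induction l with
  | nil => simp
  | cons a t ih =>
    by_cases hp : p a <;> by_cases hq : q a <;>
      simp [hp, hq] <;> omega

set_option maxHeartbeats 1600000 in
lemma stops_fold_count (l : List (List String)) (r : Int) :
    l.foldl (fun ret cards =>
      if "A" ∈ cards then ret + 1
      else if "K" ∈ cards ∧ (2 : Int) ≤ cards.length then ret + 1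
      else if "Q" ∈ cards ∧ (3 : Int) ≤ cards.length then ret + 1
      else if "J" ∈ cards ∧ (4 : Int) ≤ cards.length then ret + 1
      else ret) r
    = r + (l.countP (fun c =>
        stopHit ("A", 1) c || (stopHit ("K", 2) c || (stopHit ("Q", 3) c || stopHit ("J", 4) c))) : Nat) := by
  induction l generalizing r with
  | nil => simp
  | cons cards t ih =>
    simp only [List.foldl_cons, List.countP_cons]
    rw [ih]
    generalize List.countP _ t = k
    have h1 : "A" ∈ cards → 1 ≤ cards.length := fun h => List.length_pos_of_mem h
    by_cases hA : "A" ∈ cards <;> by_cases hK : "K" ∈ cards ∧ (2 : Int) ≤ cards.length <;>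
      by_cases hQ : "Q" ∈ cards ∧ (3 : Int) ≤ cards.length <;>
      by_cases hJ : "J" ∈ cards ∧ (4 : Int) ≤ cards.length <;>
      simp_all [stopHit] <;> (try split_ifs <;> simp_all) <;>
      first
        | omega
        | (rcases ‹_ ∨ _ ∨ _› with ⟨h, h'⟩ | ⟨h, h'⟩ | ⟨h, h'⟩ <;> simp_all <;> omega)

-- ===== VERDICT (by name: the statement is the Claim_ definition above) =====
theorem stops_spec : Claim_equal_stops := by
  intro suit_cards _
  unfold Spec_stops stops stops_alt stopTable
  rw [stops_fold_count ((PySem.Dict.ofList suit_cards).values) 0]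
  simp only [List.foldl_cons, List.foldl_nil]
  rw [← sieve_step (stopHit ("A", 1)) _, ← sieve_step (stopHit ("K", 2)) _,
      ← sieve_step (stopHit ("Q", 3)) _]
  simp only [← List.countP_eq_length_filter, List.countP_filter]
  simp only [Bool.and_comm, Bool.and_left_comm]
  ring
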